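-- pv_equiv track=rewrite | github.com/stacksparrow4/ivan2 | extract_facts.py | get_message_chains_by_user
-- ===== SOURCE A (Python) =====
-- MESSAGE_CONTEXT = 5
--
-- def get_message_chains_by_user(msg_db, user):
--     message_chains = []
--     curr_chain = []
--
--     for i, msg in enumerate(msg_db):
--         is_msg_soon = any([m[0] == user for m in msg_db[i:i+MESSAGE_CONTEXT+1]])
--
--         if is_msg_soon:
--             curr_chain.append(msg)
--         else:
--             if len(curr_chain) > 0:
--                 curr_chain.extend(msg_db[i:i+MESSAGE_CONTEXT])
--                 message_chains.append(curr_chain)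
--                 curr_chain = []
--
--     if len(curr_chain) > 0:
--         message_chains.append(curr_chain)
--
--     return message_chains
-- ===== SOURCE B (Python) =====
-- MESSAGE_CONTEXT = 5
--
-- def get_message_chains_by_user(msg_db, user):
--     n = len(msg_db)
--     # backward pass: soon[i] iff a message by `user` occurs at an index in [i, i+MESSAGE_CONTEXT]
--     soon = [False] * n
--     last_user = None
--     for i in range(n - 1, -1, -1):
--         if msg_db[i][0] == user:
--             last_user = i
--         soon[i] = last_user is not None and last_user - i <= MESSAGE_CONTEXT
--     # each maximal run of soon indices [a..b] yields the chain msg_db[a : b+1+MESSAGE_CONTEXT]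
--     chains = []
--     i = 0
--     while i < n:
--         if soon[i]:
--             j = i
--             while j + 1 < n and soon[j + 1]:
--                 j += 1
--             chains.append(msg_db[i:j + 1 + MESSAGE_CONTEXT])
--             i = j + 1
--         else:
--             i += 1
--     return chains
-- ===== Notes on version B (the rewrite author's own statement) =====
-- stated objective: alternative
-- what changed: Replaces A's per-index rescan of the 6-message window (any() over a fresh slice each iteration) by a single backward pass that records the nearest upcoming user message into a soon[] table, and then emits each maximal run of soon indices directly as one chain slice msg_db[a:b+6] instead of A's append/flush accumulator loop.
-- outside the precondition, e.g. on get_message_chains_by_user([[], ['a']], 'a'): A raises IndexError, B raises IndexError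
import Mathlib
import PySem

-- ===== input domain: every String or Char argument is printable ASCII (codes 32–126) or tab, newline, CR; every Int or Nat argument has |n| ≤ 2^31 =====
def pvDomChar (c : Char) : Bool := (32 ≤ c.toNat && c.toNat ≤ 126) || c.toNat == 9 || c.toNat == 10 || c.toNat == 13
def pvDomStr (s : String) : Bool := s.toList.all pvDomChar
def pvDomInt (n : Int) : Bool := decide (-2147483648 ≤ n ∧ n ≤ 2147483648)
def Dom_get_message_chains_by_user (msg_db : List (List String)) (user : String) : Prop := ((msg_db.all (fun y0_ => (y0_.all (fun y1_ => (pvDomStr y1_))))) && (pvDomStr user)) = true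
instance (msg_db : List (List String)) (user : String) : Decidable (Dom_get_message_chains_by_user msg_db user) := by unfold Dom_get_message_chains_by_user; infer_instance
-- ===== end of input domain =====

-- B replaces the per-index window scan by a backward pass building a `soon` table and then
-- emits each maximal run of `soon` indices as one chain slice (objective: alternative algorithm).

-- ===== PORT A =====
def get_message_chains_by_user (msg_db : List (List String)) (user : String) : List (List (List String)) :=
  let step := fun (st : List (List (List String)) × List (List String)) (p : Int × List String) =>
    let is_msg_soon := (PySem.List.slice msg_db (some p.1) (some (p.1 + 5 + 1))).any
      (fun m => PySem.List.pyGet? m 0 == some user)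
    if is_msg_soon then (st.1, st.2 ++ [p.2])
    else if st.2.length > 0 then
      (st.1 ++ [st.2 ++ PySem.List.slice msg_db (some p.1) (some (p.1 + 5))], ([] : List (List String)))
    else st
  let r := (PySem.List.enumerate msg_db 0).foldl step ([], [])
  if r.2.length > 0 then r.1 ++ [r.2] else r.1

-- ===== PORT B =====
-- backward pass of Source B: builds soon[0..n-1] front of acc while tracking nearest user-message index
def pvSoonLoop (msg_db : List (List String)) (user : String) : Nat → Option Nat → List Bool → List Bool
  | 0, _, acc => acc
  | i+1, last, acc =>
      let last' := if PySem.List.pyGet? (msg_db.getD i ([] : List String)) 0 == some user then some i else last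
      let s := match last' with
        | some l => decide (l - i ≤ 5)
        | none => false
      pvSoonLoop msg_db user i last' (s :: acc)

-- inner while loop of Source B: advance j while j+1 < n and soon[j+1]
def pvRunEnd (soon : List Bool) : Nat → Nat → Nat
  | j, 0 => j
  | j, f+1 => if j + 1 < soon.length && soon.getD (j+1) false then pvRunEnd soon (j+1) (f) else j

-- outer while loop of Source B (fuel-indexed; i strictly increases each step)
def pvChainLoop (msg_db : List (List String)) (soon : List Bool) : Nat → Nat → List (List (List String))
  | _, 0 => []
  | i, f+1 =>
    if i < soon.length then
      if soon.getD i false then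
        let j := pvRunEnd soon i (soon.length - i)
        PySem.List.slice msg_db (some (i : Int)) (some ((j : Int) + 1 + 5)) :: pvChainLoop msg_db soon (j+1) f
      else pvChainLoop msg_db soon (i+1) f
    else []

def get_message_chains_by_user_alt (msg_db : List (List String)) (user : String) : List (List (List String)) :=
  let soon := pvSoonLoop msg_db user msg_db.length none []
  pvChainLoop msg_db soon 0 msg_db.length

-- ===== PRECONDITION & SPEC =====
-- Pre_ excludes exactly the inputs where Python raises IndexError: a msg_db containing an empty
-- message, on which A's `m[0]` (and B's `msg_db[i][0]`) raises.
def Pre_get_message_chains_by_user (msg_db : List (List String)) (user : String) : Prop :=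
  ([] : List String) ∉ msg_db
instance (msg_db : List (List String)) (user : String) : Decidable (Pre_get_message_chains_by_user msg_db user) := by unfold Pre_get_message_chains_by_user; infer_instance
def pvWitness_get_message_chains_by_user : List (List String) × String := ([["a", "hi"], ["b", "yo"]], "a")

def Spec_get_message_chains_by_user (msg_db : List (List String)) (user : String) (out : List (List (List String))) : Prop := out = get_message_chains_by_user_alt msg_db user
instance (msg_db : List (List String)) (user : String) (out : List (List (List String))) : Decidable (Spec_get_message_chains_by_user msg_db user out) := by unfold Spec_get_message_chains_by_user; infer_instance

-- ===== CLAIM (what is proved, stated in full; the proofs are below) =====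
def Claim_equal_get_message_chains_by_user : Prop := ∀ (msg_db : List (List String)) (user : String), Dom_get_message_chains_by_user msg_db user → Pre_get_message_chains_by_user msg_db user → Spec_get_message_chains_by_user msg_db user (get_message_chains_by_user msg_db user)

-- ===== LEMMAS AND PROOFS =====

-- `m[0] == user` test
def pvHit (user : String) (m : List String) : Bool := PySem.List.pyGet? m 0 == some user
def pvHitIdx (msg_db : List (List String)) (user : String) (i : Nat) : Bool :=
  pvHit user (msg_db.getD i ([] : List String))
-- the per-index window test of A
def pvSoon (msg_db : List (List String)) (user : String) (i : Nat) : Bool :=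
  ((msg_db.drop i).take 6).any (pvHit user)
-- nearest hit index ≥ i
def pvNH (msg_db : List (List String)) (user : String) (i : Nat) : Option Nat :=
  (List.range' i (msg_db.length - i)).find? (fun l => pvHitIdx msg_db user l)
-- the soon table
def pvTab (msg_db : List (List String)) (user : String) : List Bool :=
  (List.range msg_db.length).map (pvSoon msg_db user)

-- reference loop (common spec): structural recursion on the suffix, index carried along
def pvSpecLoop (msg_db : List (List String)) (user : String) :
    Nat → List (List String) → List (List String) → List (List (List String))
  | _, [], curr => if curr.length > 0 then [curr] else []
  | i, m :: l, curr =>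
    if pvSoon msg_db user i then pvSpecLoop msg_db user (i+1) l (curr ++ [m])
    else if curr.length > 0 then
      (curr ++ (msg_db.drop i).take 5) :: pvSpecLoop msg_db user (i+1) l []
    else pvSpecLoop msg_db user (i+1) l curr

theorem pvHitIdx_in (msg_db : List (List String)) (user : String) (l : Nat) (h : l < msg_db.length) :
    pvHitIdx msg_db user l = pvHit user msg_db[l] := by
  simp [pvHitIdx, List.getD_eq_getElem?_getD, List.getElem?_eq_getElem h]

theorem pvSoon_iff (msg_db : List (List String)) (user : String) (i : Nat) :
    pvSoon msg_db user i = true ↔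
      ∃ l, i ≤ l ∧ l < msg_db.length ∧ l ≤ i + 5 ∧ pvHitIdx msg_db user l = true := by
  unfold pvSoon
  rw [List.any_eq_true]
  constructor
  · rintro ⟨x, hx, hpx⟩
    obtain ⟨k, hk, hkx⟩ := List.mem_iff_getElem.mp hx
    have hk' : k < 6 ∧ i + k < msg_db.length := by
      have := hk; simp only [List.length_take, List.length_drop] at this; omega
    refine ⟨i + k, by omega, hk'.2, by omega, ?_⟩
    rw [pvHitIdx_in msg_db user _ hk'.2]
    have hg : ((msg_db.drop i).take 6)[k]'hk = msg_db[i + k]'hk'.2 := by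
      rw [List.getElem_take, List.getElem_drop]
    rw [hg] at hkx
    rw [hkx]; exact hpx
  · rintro ⟨l, h1, h2, h3, h4⟩
    have hkd : l - i < (msg_db.drop i).length := by simp [List.length_drop]; omega
    have hkt : l - i < ((msg_db.drop i).take 6).length := by
      simp [List.length_take, List.length_drop]; omega
    refine ⟨((msg_db.drop i).take 6)[l - i], List.getElem_mem hkt, ?_⟩
    have : ((msg_db.drop i).take 6)[l - i] = msg_db[i + (l - i)]'(by omega) := by
      rw [List.getElem_take, List.getElem_drop]
    rw [this]
    have hil : i + (l - i) = l := by omega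
    rw [pvHitIdx_in msg_db user l h2] at h4
    simp_rw [hil]
    exact h4

theorem pvNH_none (msg_db : List (List String)) (user : String) (i : Nat)
    (h : pvNH msg_db user i = none) :
    ∀ l, i ≤ l → l < msg_db.length → pvHitIdx msg_db user l = false := by
  intro l hil hln
  have := List.find?_eq_none.mp h l (List.mem_range'_1.mpr ⟨hil, by omega⟩)
  simpa using this

theorem pvNH_step (msg_db : List (List String)) (user : String) (i : Nat) (hi : i < msg_db.length) :
    pvNH msg_db user i = if pvHitIdx msg_db user i then some i else pvNH msg_db user (i+1) := by
  unfold pvNH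
  have h1 : msg_db.length - i = (msg_db.length - (i+1)) + 1 := by omega
  rw [h1, List.range'_succ, List.find?_cons]
  by_cases h : pvHitIdx msg_db user i <;> simp [h]

theorem pvNH_some (msg_db : List (List String)) (user : String) (i l : Nat)
    (h : pvNH msg_db user i = some l) :
    i ≤ l ∧ l < msg_db.length ∧ pvHitIdx msg_db user l = true ∧
      ∀ k, i ≤ k → k < l → pvHitIdx msg_db user k = false := by
  by_cases hi : i < msg_db.length
  · rw [pvNH_step msg_db user i hi] at h
    by_cases hh : pvHitIdx msg_db user i
    · simp [hh] at h
      subst h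
      exact ⟨le_refl _, hi, hh, fun k h1 h2 => absurd h1 (by omega)⟩
    · simp [hh] at h
      obtain ⟨h1, h2, h3, h4⟩ := pvNH_some msg_db user (i+1) l h
      refine ⟨by omega, h2, h3, fun k hk1 hk2 => ?_⟩
      rcases Nat.eq_or_lt_of_le hk1 with rfl | hlt
      · simpa using hh
      · exact h4 k hlt hk2
  · exfalso
    unfold pvNH at h
    have : msg_db.length - i = 0 := by omega
    simp [this] at h
termination_by msg_db.length - i
decreasing_by omega


theorem pvSoon_eq_nh (msg_db : List (List String)) (user : String) (i : Nat) :
    pvSoon msg_db user i = (match pvNH msg_db user i with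
      | some l => decide (l - i ≤ 5)
      | none => false) := by
  cases hnh : pvNH msg_db user i with
  | none =>
    simp only []
    cases hs : pvSoon msg_db user i
    · rfl
    · exfalso
      obtain ⟨l, h1, h2, h3, h4⟩ := (pvSoon_iff msg_db user i).mp hs
      rw [pvNH_none msg_db user i hnh l h1 h2] at h4
      exact absurd h4 (by simp)
  | some l =>
    obtain ⟨h1, h2, h3, h4⟩ := pvNH_some msg_db user i l hnh
    simp only []
    by_cases hd : l - i ≤ 5
    · simp [hd]
      exact (pvSoon_iff msg_db user i).mpr ⟨l, h1, h2, by omega, h3⟩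
    · simp [hd]
      cases hs : pvSoon msg_db user i
      · rfl
      · exfalso
        obtain ⟨m, g1, g2, g3, g4⟩ := (pvSoon_iff msg_db user i).mp hs
        have : m < l := by omega
        rw [h4 m g1 this] at g4
        exact absurd g4 (by simp)

theorem pvSoonLoop_eq (msg_db : List (List String)) (user : String) :
    ∀ (i : Nat) (acc : List Bool), i ≤ msg_db.length →
      pvSoonLoop msg_db user i (pvNH msg_db user i) acc
        = (List.range i).map (pvSoon msg_db user) ++ acc := by
  intro i
  induction i with
  | zero => intro acc _; simp [pvSoonLoop]
  | succ i ih =>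
    intro acc hle
    have hi : i < msg_db.length := by omega
    simp only [pvSoonLoop]
    have hlast : (if PySem.List.pyGet? (msg_db.getD i ([] : List String)) 0 == some user
        then some i else pvNH msg_db user (i+1)) = pvNH msg_db user i :=
      (pvNH_step msg_db user i hi).symm
    rw [hlast]
    have hs : (match pvNH msg_db user i with
        | some l => decide (l - i ≤ 5)
        | none => false) = pvSoon msg_db user i := (pvSoon_eq_nh msg_db user i).symm
    rw [hs, ih _ (by omega), List.range_succ]
    simp

theorem pvTab_len (msg_db : List (List String)) (user : String) :
    (pvTab msg_db user).length = msg_db.length := by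
  simp [pvTab]

theorem pvTab_getD (msg_db : List (List String)) (user : String) (k : Nat) (hk : k < msg_db.length) :
    (pvTab msg_db user).getD k false = pvSoon msg_db user k := by
  simp [pvTab, List.getD_eq_getElem?_getD, List.getElem?_map, List.getElem?_range hk]

theorem pvRunEnd_spec (msg_db : List (List String)) (user : String) :
    ∀ (f j : Nat), j < msg_db.length → msg_db.length - j ≤ f →
      pvSoon msg_db user j = true →
      (j ≤ pvRunEnd (pvTab msg_db user) j f ∧
       pvRunEnd (pvTab msg_db user) j f < msg_db.length ∧
       (∀ k, j ≤ k → k ≤ pvRunEnd (pvTab msg_db user) j f → pvSoon msg_db user k = true) ∧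
       (msg_db.length ≤ pvRunEnd (pvTab msg_db user) j f + 1 ∨
         pvSoon msg_db user (pvRunEnd (pvTab msg_db user) j f + 1) = false)) := by
  intro f
  induction f with
  | zero => intro j hj hf _; omega
  | succ f ih =>
    intro j hj hf hsoon
    simp only [pvRunEnd, pvTab_len]
    by_cases hc : (j + 1 < msg_db.length ∧ (pvTab msg_db user).getD (j+1) false = true)
    · have hcb : (decide (j + 1 < msg_db.length) && (pvTab msg_db user).getD (j+1) false) = true := by
        rw [hc.2, Bool.and_true]; simpa using hc.1
      rw [if_pos hcb]
      have hs1 : pvSoon msg_db user (j+1) = true := by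
        rw [← pvTab_getD msg_db user (j+1) hc.1]; exact hc.2
      obtain ⟨g1, g2, g3, g4⟩ := ih (j+1) hc.1 (by omega) hs1
      refine ⟨by omega, g2, ?_, g4⟩
      intro k hk1 hk2
      rcases Nat.eq_or_lt_of_le hk1 with rfl | hlt
      · exact hsoon
      · exact g3 k hlt hk2
    · have hcb : (decide (j + 1 < msg_db.length) && (pvTab msg_db user).getD (j+1) false) = false := by
        by_cases h1 : j + 1 < msg_db.length
        · have h2 : (pvTab msg_db user).getD (j+1) false = false := by
            cases h : (pvTab msg_db user).getD (j+1) false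
            · rfl
            · exact absurd ⟨h1, h⟩ hc
          rw [h2, Bool.and_false]
        · simp [h1]
      rw [if_neg (by simp only [hcb]; decide)]
      refine ⟨le_refl _, hj, ?_, ?_⟩
      · intro k hk1 hk2
        have : k = j := by omega
        subst this; exact hsoon
      · by_cases h1 : j + 1 < msg_db.length
        · right
          rw [← pvTab_getD msg_db user (j+1) h1]
          cases h : (pvTab msg_db user).getD (j+1) false
          · rfl
          · exact absurd ⟨h1, h⟩ hc
        · left; omega

theorem pvSpecLoop_run (msg_db : List (List String)) (user : String) :
    ∀ (d i : Nat) (curr : List (List String)), i + d < msg_db.length →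
      (∀ k, i ≤ k → k ≤ i + d → pvSoon msg_db user k = true) →
      (msg_db.length ≤ i + d + 1 ∨ pvSoon msg_db user (i + d + 1) = false) →
      pvSpecLoop msg_db user i (msg_db.drop i) curr
        = (curr ++ (msg_db.drop i).take (d + 6)) ::
            pvSpecLoop msg_db user (i+d+1) (msg_db.drop (i+d+1)) [] := by
  intro d
  induction d with
  | zero =>
    intro i curr hd hall hend
    simp only [Nat.add_zero] at hd hend ⊢
    simp only [Nat.zero_add]
    have hi : i < msg_db.length := hd
    have hdrop : msg_db.drop i = msg_db[i] :: msg_db.drop (i+1) := (List.getElem_cons_drop hi).symm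
    have hsoon : pvSoon msg_db user i = true := hall i (le_refl _) (by omega)
    rw [hdrop]
    simp only [pvSpecLoop, hsoon, if_pos]
    have h6 : List.take 6 (msg_db[i] :: msg_db.drop (i+1))
        = msg_db[i] :: List.take 5 (msg_db.drop (i+1)) := rfl
    rw [h6]
    by_cases h1 : i + 1 < msg_db.length
    · have hs1 : pvSoon msg_db user (i+1) = false := by
        rcases hend with h | h
        · omega
        · exact h
      have hdrop1 : msg_db.drop (i+1) = msg_db[i+1] :: msg_db.drop (i+2) :=
        (List.getElem_cons_drop h1).symm
      rw [hdrop1]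
      simp only [pvSpecLoop, hs1, Bool.false_eq_true, if_false]
      rw [if_pos (by simp), if_neg (by simp)]
      simp [List.append_assoc]
    · have hnil : msg_db.drop (i+1) = [] := List.drop_eq_nil_of_le (by omega)
      rw [hnil]
      simp only [pvSpecLoop]
      rw [if_pos (by simp), if_neg (by simp)]
      simp
  | succ d ih =>
    intro i curr hd hall hend
    have hi : i < msg_db.length := by omega
    have hdrop : msg_db.drop i = msg_db[i] :: msg_db.drop (i+1) := (List.getElem_cons_drop hi).symm
    have hsoon : pvSoon msg_db user i = true := hall i (le_refl _) (by omega)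
    rw [hdrop]
    simp only [pvSpecLoop, hsoon, if_pos]
    have hrec := ih (i+1) (curr ++ [msg_db[i]]) (by omega)
      (fun k hk1 hk2 => hall k (by omega) (by omega))
      (by rcases hend with h | h
          · left; omega
          · right; have he : i + 1 + d + 1 = i + (d+1) + 1 := by omega
            rw [he]; exact h)
    rw [hrec]
    have hidx : i + 1 + d + 1 = i + (d + 1) + 1 := by omega
    rw [hidx]
    congr 1
    have h7 : d + 1 + 6 = (d + 6) + 1 := by omega
    rw [h7, List.take_succ_cons]
    simp [List.append_assoc]

theorem pvChainLoop_eq (msg_db : List (List String)) (user : String) :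
    ∀ (f i : Nat), msg_db.length - i ≤ f →
      pvChainLoop msg_db (pvTab msg_db user) i f
        = pvSpecLoop msg_db user i (msg_db.drop i) [] := by
  intro f
  induction f with
  | zero =>
    intro i hf
    have hnil : msg_db.drop i = [] := List.drop_eq_nil_of_le (by omega)
    simp [pvChainLoop, hnil, pvSpecLoop]
  | succ f ih =>
    intro i hf
    simp only [pvChainLoop, pvTab_len]
    by_cases hi : i < msg_db.length
    · rw [if_pos hi]
      cases hs : pvSoon msg_db user i
      · rw [pvTab_getD msg_db user i hi, hs]
        simp only [Bool.false_eq_true, if_false]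
        rw [ih (i+1) (by omega)]
        have hdrop : msg_db.drop i = msg_db[i] :: msg_db.drop (i+1) := (List.getElem_cons_drop hi).symm
        rw [hdrop]
        simp only [pvSpecLoop, hs, Bool.false_eq_true, if_false]
        rw [if_neg (by simp)]
      · rw [pvTab_getD msg_db user i hi, hs, if_pos rfl]
        obtain ⟨g1, g2, g3, g4⟩ :=
          pvRunEnd_spec msg_db user (msg_db.length - i) i hi (le_refl _) hs
        have hrun := pvSpecLoop_run msg_db user
          (pvRunEnd (pvTab msg_db user) i (msg_db.length - i) - i) i [] (by omega)
          (fun k hk1 hk2 => g3 k hk1 (by omega))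
          (by have he : i + (pvRunEnd (pvTab msg_db user) i (msg_db.length - i) - i) + 1
                = pvRunEnd (pvTab msg_db user) i (msg_db.length - i) + 1 := by omega
              rw [he]; exact g4)
        have he : i + (pvRunEnd (pvTab msg_db user) i (msg_db.length - i) - i) + 1
            = pvRunEnd (pvTab msg_db user) i (msg_db.length - i) + 1 := by omega
        rw [he] at hrun
        rw [hrun, ih _ (by omega)]
        have hcast : ((pvRunEnd (pvTab msg_db user) i (msg_db.length - i) : Int) + 1 + 5)
            = (((pvRunEnd (pvTab msg_db user) i (msg_db.length - i) + 6 : Nat)) : Int) := by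
          push_cast; ring
        rw [hcast, PySem.List.slice_natCast]
        have hsub : pvRunEnd (pvTab msg_db user) i (msg_db.length - i) + 6 - i
            = pvRunEnd (pvTab msg_db user) i (msg_db.length - i) - i + 6 := by omega
        rw [hsub, List.nil_append]
    · rw [if_neg hi]
      have hnil : msg_db.drop i = [] := List.drop_eq_nil_of_le (by omega)
      simp [hnil, pvSpecLoop]

theorem pvFoldA (msg_db : List (List String)) (user : String) :
    ∀ (l : List (List String)) (i : Nat), msg_db.drop i = l →
      ∀ (chains : List (List (List String))) (curr : List (List String)),
      (let r := (PySem.List.enumerate l (i : Int)).foldl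
        (fun (st : List (List (List String)) × List (List String)) (p : Int × List String) =>
          let is_msg_soon := (PySem.List.slice msg_db (some p.1) (some (p.1 + 5 + 1))).any
            (fun m => PySem.List.pyGet? m 0 == some user)
          if is_msg_soon then (st.1, st.2 ++ [p.2])
          else if st.2.length > 0 then
            (st.1 ++ [st.2 ++ PySem.List.slice msg_db (some p.1) (some (p.1 + 5))], ([] : List (List String)))
          else st) (chains, curr);
       if r.2.length > 0 then r.1 ++ [r.2] else r.1)
        = chains ++ pvSpecLoop msg_db user i l curr := by
  intro l
  induction l with
  | nil =>
    intro i _ chains curr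
    simp only [PySem.List.enumerate_nil, List.foldl_nil, pvSpecLoop]
    show (if curr.length > 0 then chains ++ [curr] else chains)
      = chains ++ (if curr.length > 0 then [curr] else [])
    by_cases hc : curr.length > 0
    · rw [if_pos hc, if_pos hc]
    · rw [if_neg hc, if_neg hc, List.append_nil]
  | cons m l ih =>
    intro i hdrop chains curr
    have hi : i < msg_db.length := by
      by_contra h
      rw [List.drop_eq_nil_of_le (by omega)] at hdrop
      exact absurd hdrop (by simp)
    have hdrop1 : msg_db.drop (i+1) = l := by
      rw [← List.tail_drop, hdrop]
      rfl
    rw [PySem.List.enumerate_cons]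
    simp only [List.foldl_cons]
    have hcast : ((i : Int) + 5 + 1) = (((i + 6 : Nat)) : Int) := by push_cast; ring
    have hcast5 : ((i : Int) + 5) = (((i + 5 : Nat)) : Int) := by push_cast; ring
    have hcast1 : ((i : Int) + 1) = (((i + 1 : Nat)) : Int) := by push_cast; ring
    rw [hcast]
    rw [hcast5, hcast1]
    rw [PySem.List.slice_natCast, PySem.List.slice_natCast]
    have h6 : i + 6 - i = 6 := by omega
    have h5 : i + 5 - i = 5 := by omega
    rw [h6, h5]
    have hcond : (((msg_db.drop i).take 6).any (fun m => PySem.List.pyGet? m 0 == some user))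
        = pvSoon msg_db user i := rfl
    rw [hcond]
    cases hs : pvSoon msg_db user i
    · simp only [Bool.false_eq_true, if_false]
      by_cases hc : curr.length > 0
      · rw [if_pos hc]
        rw [ih (i+1) hdrop1]
        simp only [pvSpecLoop, hs, Bool.false_eq_true, if_false]
        rw [if_pos hc]
        simp [List.append_assoc]
      · rw [if_neg hc]
        rw [ih (i+1) hdrop1]
        simp only [pvSpecLoop, hs, Bool.false_eq_true, if_false]
        rw [if_neg hc]
    · rw [if_pos rfl]
      rw [ih (i+1) hdrop1]
      simp only [pvSpecLoop, hs, if_pos]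

-- ===== VERDICT (by name: the statement is the Claim_ definition above) =====
theorem get_message_chains_by_user_spec : Claim_equal_get_message_chains_by_user := by
  intro msg_db user _ _
  unfold Spec_get_message_chains_by_user
  unfold get_message_chains_by_user get_message_chains_by_user_alt
  have hnone : pvNH msg_db user msg_db.length = none := by
    unfold pvNH; simp
  have hsoon : pvSoonLoop msg_db user msg_db.length none []
      = pvTab msg_db user := by
    rw [← hnone, pvSoonLoop_eq msg_db user msg_db.length [] (le_refl _)]
    simp [pvTab]
  have hA := pvFoldA msg_db user msg_db 0 (by simp) [] []
  have hcast0 : ((0 : Nat) : Int) = (0 : Int) := by simp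
  rw [hcast0] at hA
  rw [hA, hsoon, pvChainLoop_eq msg_db user msg_db.length 0 (by omega)]
  simp
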